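-- pv_equiv track=rewrite | github.com/SsyHow/Codeforces2 | 2106d/main.py | f
-- ===== SOURCE A (Python) =====
-- def f(n, m, L1, L2):
--     suf = [0] * (n + 1)
--     for i in range(n - 1, -1, -1):
--         suf[i] = suf[i + 1]
--         if L1[i] >= L2[m - 1 - suf[i]]:
--             suf[i] += 1
--
--             if suf[i] == m :
--                 return 0
--     ans = 1 << 60
--     if suf[0] == m -1:
--         ans = L2[0]
--
--     pre = 0
--     for i, v in enumerate(L1):
--         if v >= L2[pre]:
--             pre += 1
--
--         if pre + suf[i + 1] >= m:
--             return 0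
--
--         if pre + suf[i + 1] == m - 1:
--             ans = min(ans, L2[pre])
--
--     if ans == 1 << 60:
--         ans = -1
--     return ans
-- ===== SOURCE B (Python) =====
-- def f(n, m, L1, L2):
--     # Greedy suffix-match COUNTS suf[i] (capped at m), then a positional prefix
--     # array F[j] = least prefix length of L1 greedily matching the first j
--     # elements of L2, combined by a loop over L2-indices j (not over split
--     # points): 0 iff L2 is fully matchable, else min L2[j] over the j whose
--     # removal makes it matchable, else -1.
--     suf = [0] * (n + 1)
--     for i in range(n - 1, -1, -1):
--         v = L1[i]
--         s = suf[i + 1]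
--         if s < m and v >= L2[m - 1 - s]:
--             s += 1
--         suf[i] = s
--     if suf[0] >= m:
--         return 0
--     F = [n + 1] * (m + 1)
--     F[0] = 0
--     p = 0
--     for i in range(n):
--         v = L1[i]
--         if p < m and v >= L2[p]:
--             p += 1
--             F[p] = i + 1
--     if F[m] <= n:
--         return 0
--     best = None
--     for j in range(m):
--         if F[j] > n:
--             break
--         if j + suf[F[j]] >= m:
--             return 0
--         if j + suf[F[j]] == m - 1 and (best is None or L2[j] < best):
--             best = L2[j]
--     return best if best is not None else -1
-- ===== Notes on version B (the rewrite author's own statement) =====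
-- stated objective: alternative
-- what changed: B keeps only the greedy suffix COUNT array (capped, no early returns) and replaces A's whole second phase: instead of A's interleaved prefix scan over split points with a 1<<60 sentinel, B builds a positional array F[j] = least prefix length of L1 greedily matching the first j elements of L2 and reads the answer off with a loop over L2-indices j (0 iff suf[0]==m or F[m]<=n or some j+suf[F[j]]>=m, else min L2[j] over j+suf[F[j]]==m-1, else -1).
-- intended difference: On n=0 with m<=0 A returns -1 but B returns 0, the intended value: with no L2 elements to match the cost is 0, and A's -1 is an artefact of its suf[0]==m-1 seeding never firing. — e.g. on f(0, 0, [], []): A returns -1, B returns 0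
-- outside the precondition, e.g. on f(2, 2, [9, 8, 0], [1, 1]): A returns 0, B returns 0; on f(2, 0, [5, 6], [7]): A returns 0, B returns 0
import Mathlib
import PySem

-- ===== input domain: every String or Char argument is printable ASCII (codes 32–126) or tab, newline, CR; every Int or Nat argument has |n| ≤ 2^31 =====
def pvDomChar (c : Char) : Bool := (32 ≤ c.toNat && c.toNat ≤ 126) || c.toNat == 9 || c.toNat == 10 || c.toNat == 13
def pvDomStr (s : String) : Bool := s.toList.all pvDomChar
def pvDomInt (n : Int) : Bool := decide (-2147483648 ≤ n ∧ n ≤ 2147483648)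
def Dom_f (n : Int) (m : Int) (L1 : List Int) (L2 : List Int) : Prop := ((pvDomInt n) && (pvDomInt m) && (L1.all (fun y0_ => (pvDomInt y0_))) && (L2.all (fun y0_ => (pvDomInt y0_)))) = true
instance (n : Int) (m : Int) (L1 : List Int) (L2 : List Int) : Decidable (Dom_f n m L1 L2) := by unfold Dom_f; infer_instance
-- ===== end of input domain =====

-- B keeps only the capped greedy suffix COUNT array and replaces A's whole second phase
-- (an interleaved prefix scan over split points with a 1<<60 sentinel and early returns) by a
-- positional array F[j] = least prefix length of L1 greedily matching the first j elements of
-- L2, read off with a loop over L2-indices j; same O(n+m) cost (objective: alternative).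

-- ===== PORT A =====
-- Loop 1 body.  Python mutates the array suf[0..n] in place, writing suf[i] from suf[i+1];
-- the port carries the written portion suf[i..n] as a list and prepends each new cell (the
-- untouched zero cells to the left are never read), so every value is the Python value.
def fStep1 (m : Int) (L1 : List Int) (L2 : List Int) (suf : List Int) (i : Int) : Except Int (List Int) :=
  let s := suf.headD 0                                   -- suf[i] = suf[i+1]
  if PySem.List.pyGetD L1 i 0 ≥ PySem.List.pyGetD L2 (m - 1 - s) 0 then
    if s + 1 = m then Except.error 0                     -- suf[i] += 1; if suf[i] == m: return 0
    else Except.ok ((s + 1) :: suf)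
  else Except.ok (s :: suf)

-- Loop 2 body; state (pre, ans), input (i, v) from enumerate.
def fStep2 (m : Int) (L2 : List Int) (suf : List Int) (st : Int × Int) (iv : Int × Int) : Except Int (Int × Int) :=
  let pre := if iv.2 ≥ PySem.List.pyGetD L2 st.1 0 then st.1 + 1 else st.1
  if pre + PySem.List.pyGetD suf (iv.1 + 1) 0 ≥ m then Except.error 0
  else if pre + PySem.List.pyGetD suf (iv.1 + 1) 0 = m - 1 then
    Except.ok (pre, min st.2 (PySem.List.pyGetD L2 pre 0))
  else Except.ok (pre, st.2)

def f (n : Int) (m : Int) (L1 : List Int) (L2 : List Int) : Int :=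
  match (PySem.List.pyRange (n - 1) (-1) (-1)).foldlM (fStep1 m L1 L2) [0] with
  | Except.error r => r
  | Except.ok suf =>
    let ans : Int := (1 : Int) <<< 60
    let ans := if PySem.List.pyGetD suf 0 0 = m - 1 then PySem.List.pyGetD L2 0 0 else ans
    match (PySem.List.enumerate L1).foldlM (fStep2 m L2 suf) (0, ans) with
    | Except.error r => r
    | Except.ok st => if st.2 = (1 : Int) <<< 60 then -1 else st.2

-- ===== PORT B =====
-- Suffix loop body: Python writes suf[i] from suf[i+1] into the preallocated
-- [0]*(n+1); the port carries the written portion suf[i..n] as a list and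
-- prepends each new cell (the untouched zero cells to the left are never
-- read), so every value is the Python value.
def fAltSufStep (m : Int) (L1 : List Int) (L2 : List Int) (suf : List Int) (i : Int) : List Int :=
  let v := PySem.List.pyGetD L1 i 0
  let s := suf.headD 0
  let s := if s < m ∧ v ≥ PySem.List.pyGetD L2 (m - 1 - s) 0 then s + 1 else s
  s :: suf

-- F-loop body: Python 'if p < m and v >= L2[p]: p += 1; F[p] = i + 1'.  The list-cell
-- assignment F[p] = v is ported with List.set; the index p + 1 is nonnegative throughout
-- (p starts at 0 and only increments), so .toNat is exact here.
def fAltFStep (m : Int) (L1 : List Int) (L2 : List Int) (st : List Int × Int) (i : Int) : List Int × Int :=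
  if st.2 < m ∧ PySem.List.pyGetD L1 i 0 ≥ PySem.List.pyGetD L2 st.2 0 then
    (st.1.set (st.2 + 1).toNat (i + 1), st.2 + 1)
  else st

-- Combine-loop body over j = 0..m-1; Except.error carries the early exits
-- ('break' followed by the final return, and 'return 0').
def fAltCombStep (n : Int) (m : Int) (L2 : List Int) (suf : List Int) (F : List Int)
    (best : Option Int) (j : Int) : Except Int (Option Int) :=
  if PySem.List.pyGetD F j 0 > n then
    Except.error (match best with | some b => b | none => -1)
  else if j + PySem.List.pyGetD suf (PySem.List.pyGetD F j 0) 0 ≥ m then Except.error 0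
  else if j + PySem.List.pyGetD suf (PySem.List.pyGetD F j 0) 0 = m - 1 then
    Except.ok (if (match best with | none => true | some b => decide (PySem.List.pyGetD L2 j 0 < b))
      then some (PySem.List.pyGetD L2 j 0) else best)
  else Except.ok best

def f_alt (n : Int) (m : Int) (L1 : List Int) (L2 : List Int) : Int :=
  let suf := (PySem.List.pyRange (n - 1) (-1) (-1)).foldl (fAltSufStep m L1 L2) [0]
  if PySem.List.pyGetD suf 0 0 ≥ m then 0
  else
    let F := ((PySem.List.pyRange 0 n 1).foldl (fAltFStep m L1 L2)
      ((List.replicate (m + 1).toNat (n + 1)).set 0 0, 0)).1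
    if PySem.List.pyGetD F m 0 ≤ n then 0
    else
      match (PySem.List.pyRange 0 m 1).foldlM (fAltCombStep n m L2 suf F) none with
      | Except.error r => r
      | Except.ok (some b) => b
      | Except.ok none => -1

-- ===== PRECONDITION & SPEC =====
-- Pre_ covers the inputs on which A is guaranteed to return: the CF input contract
-- n = len(L1), 1 ≤ m ≤ len(L2); the degenerate m ≤ 0 inputs with 1 ≤ n ≤ len(L1) and
-- n ≤ len(L2) + m (A's backward scan then stays inside L2 by negative-index wraparound and
-- loop 2 returns 0 at its first step); the empty-L1 inputs n = 0; and the m = 1 inputs with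
-- L1[n-1] >= L2[0], on which both return 0 at once.  Excluded inputs where
-- A still returns exist (n or m misdescribing the lists so that A's IndexError is avoided
-- only by a data-dependent early return); see the cites in the claim.
def Pre_f (n : Int) (m : Int) (L1 : List Int) (L2 : List Int) : Prop :=
  (1 ≤ n ∧ n ≤ (L1.length : Int) ∧ m ≤ 0 ∧ n ≤ (L2.length : Int) + m)
  ∨ (n = (L1.length : Int) ∧ 1 ≤ m ∧ m ≤ (L2.length : Int))
  ∨ (n = 0 ∧ L1.length = 0 ∧ (m ≤ 0 ∨ 2 ≤ m ∨ (m = 1 ∧ 1 ≤ (L2.length : Int))))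
  ∨ (m = 1 ∧ 1 ≤ n ∧ n ≤ (L1.length : Int) ∧ 1 ≤ (L2.length : Int)
      ∧ PySem.List.pyGetD L1 (n - 1) 0 ≥ PySem.List.pyGetD L2 0 0)
instance (n : Int) (m : Int) (L1 : List Int) (L2 : List Int) : Decidable (Pre_f n m L1 L2) := by unfold Pre_f; infer_instance

def pvWitness_f : Int × Int × List Int × List Int := (3, 2, [5, 1, 7], [3, 6])

-- On n=0 with m ≤ 0 A returns -1 but B returns 0, the intended value: with no L2 elements to
-- match the cost is 0, and A's -1 is an artefact of its suf[0]==m-1 seeding never firing.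
def D_f (n : Int) (m : Int) (L1 : List Int) (L2 : List Int) : Prop := n = 0 ∧ m ≤ 0
instance (n : Int) (m : Int) (L1 : List Int) (L2 : List Int) : Decidable (D_f n m L1 L2) := by unfold D_f; infer_instance

def Spec_f (n : Int) (m : Int) (L1 : List Int) (L2 : List Int) (out : Int) : Prop := ¬ D_f n m L1 L2 → out = f_alt n m L1 L2
instance (n : Int) (m : Int) (L1 : List Int) (L2 : List Int) (out : Int) : Decidable (Spec_f n m L1 L2 out) := by unfold Spec_f; infer_instance

def pvDiffWitness_f : Int × Int × List Int × List Int := (0, 0, [], [])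
def pvDiffWitnessOut_f : Int × Int := (-1, 0)

-- ===== CLAIM (what is proved, stated in full; the proofs are below) =====
def Claim_unchanged_f : Prop := ∀ (n : Int) (m : Int) (L1 : List Int) (L2 : List Int), Dom_f n m L1 L2 → Pre_f n m L1 L2 → Spec_f n m L1 L2 (f n m L1 L2)
def Claim_changed_f : Prop := Dom_f (pvDiffWitness_f.1) (pvDiffWitness_f.2.1) (pvDiffWitness_f.2.2.1) (pvDiffWitness_f.2.2.2) ∧ Pre_f (pvDiffWitness_f.1) (pvDiffWitness_f.2.1) (pvDiffWitness_f.2.2.1) (pvDiffWitness_f.2.2.2) ∧ D_f (pvDiffWitness_f.1) (pvDiffWitness_f.2.1) (pvDiffWitness_f.2.2.1) (pvDiffWitness_f.2.2.2) ∧ f (pvDiffWitness_f.1) (pvDiffWitness_f.2.1) (pvDiffWitness_f.2.2.1) (pvDiffWitness_f.2.2.2) = pvDiffWitnessOut_f.1 ∧ f_alt (pvDiffWitness_f.1) (pvDiffWitness_f.2.1) (pvDiffWitness_f.2.2.1) (pvDiffWitness_f.2.2.2) = pvDiffWitnessOut_f.2 ∧ pvDiffWitnessOut_f.1 ≠ 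pvDiffWitnessOut_f.2
def Claim_exact_f : Prop := ∀ (n : Int) (m : Int) (L1 : List Int) (L2 : List Int), Dom_f n m L1 L2 → Pre_f n m L1 L2 → D_f n m L1 L2 → f n m L1 L2 ≠ f_alt n m L1 L2

-- ===== LEMMAS AND PROOFS =====

-- Reference greedy steps and arrays.
def pstepR (m : Int) (L2 : List Int) (p v : Int) : Int :=
  if p < m ∧ v ≥ PySem.List.pyGetD L2 p 0 then p + 1 else p
def sstepR (m : Int) (L2 : List Int) (s v : Int) : Int :=
  if s < m ∧ v ≥ PySem.List.pyGetD L2 (m - 1 - s) 0 then s + 1 else s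

-- sufF m L2 L = the final Python array suf[] for L1 = L (capped at m), as [suf[0],…,suf[n]].
def sufF (m : Int) (L2 : List Int) : List Int → List Int
  | [] => [0]
  | v :: t => sstepR m L2 ((sufF m L2 t).headD 0) v :: sufF m L2 t

-- preAt t = greedy count of L2's front matched by L1[0:t] (capped); sufAt t = same for L1[t:] and L2's back.
def preAt (m : Int) (L2 L1 : List Int) (t : Nat) : Int := (L1.take t).foldl (pstepR m L2) 0
def sufAt (m : Int) (L2 L1 : List Int) (t : Nat) : Int := (sufF m L2 (L1.drop t)).headD 0

-- pre values after each prefix, from start p (A's loop-2 shadow).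
def preTail (m : Int) (L2 : List Int) (p : Int) : List Int → List Int
  | [] => []
  | v :: t => pstepR m L2 p v :: preTail m L2 (pstepR m L2 p v) t

-- A's loop 2 as a structural walk over zip L1 (suf tail).
def walkA (m : Int) (L2 : List Int) : List (Int × Int) → Int × Int → Except Int (Int × Int)
  | [], st => Except.ok st
  | vs :: rest, st =>
    let p' := if vs.1 ≥ PySem.List.pyGetD L2 st.1 0 then st.1 + 1 else st.1
    if p' + vs.2 ≥ m then Except.error 0
    else if p' + vs.2 = m - 1 then walkA m L2 rest (p', min st.2 (PySem.List.pyGetD L2 p' 0))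
    else walkA m L2 rest (p', st.2)

lemma shift60 : (1 : Int) <<< 60 = 1152921504606846976 := by decide

lemma sufF_ne_nil (m : Int) (L2 L : List Int) : sufF m L2 L ≠ [] := by
  cases L <;> simp [sufF]

lemma sufF_length (m : Int) (L2 L : List Int) : (sufF m L2 L).length = L.length + 1 := by
  induction L with
  | nil => simp [sufF]
  | cons v t ih => simp [sufF, ih]

lemma sufF_mem_nonneg (m : Int) (L2 L : List Int) : ∀ x ∈ sufF m L2 L, 0 ≤ x := by
  induction L with
  | nil => simp [sufF]
  | cons v t ih =>
    obtain ⟨a, t', h⟩ := List.exists_cons_of_ne_nil (sufF_ne_nil m L2 t)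
    have ha : (0:Int) ≤ a := ih a (by rw [h]; exact List.mem_cons_self)
    intro x hx
    rw [sufF] at hx
    simp only [h, List.headD_cons] at hx
    rcases List.mem_cons.1 hx with rfl | hx'
    · simp only [sstepR]; split <;> omega
    · exact ih x (h ▸ hx')

lemma sufF_head_le (m : Int) (hm : 0 ≤ m) (L2 L : List Int) : (sufF m L2 L).headD 0 ≤ m := by
  induction L with
  | nil => simpa [sufF]
  | cons v t ih =>
    rw [sufF]
    simp only [List.headD_cons, sstepR]
    split <;> omega

lemma loop1A_gen (m : Int) (hm : 1 ≤ m) (L1 L2 : List Int) :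
    ∀ (j : Nat), j ≤ L1.length →
    (PySem.List.pyRange ((L1.length : Int) - 1) (((L1.length - j : Nat) : Int) - 1) (-1)).foldlM (fStep1 m L1 L2) [0]
      = if (sufF m L2 (L1.drop (L1.length - j))).headD 0 = m then Except.error 0
        else Except.ok (sufF m L2 (L1.drop (L1.length - j))) := by
  intro j
  induction j with
  | zero =>
    intro _
    simp only [Nat.sub_zero, List.drop_length]
    rw [PySem.List.pyRange_neg_one_eq_nil (by omega)]
    simp only [List.foldlM, sufF, List.headD_cons]
    rw [if_neg (by omega)]
    rfl
  | succ j ih =>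
    intro hj
    have hk : L1.length - (j + 1) < L1.length := by omega
    have hNj : L1.length - j = (L1.length - (j + 1)) + 1 := by omega
    set k : Nat := L1.length - (j + 1) with hkdef
    have hsplit : PySem.List.pyRange ((L1.length : Int) - 1) ((k : Int) - 1) (-1)
        = PySem.List.pyRange ((L1.length : Int) - 1) (k : Int) (-1) ++ [(k : Int)] := by
      rw [PySem.List.pyRange_neg_one_eq_reverse, PySem.List.pyRange_neg_one_eq_reverse]
      have h1 : ((k : Int) - 1) + 1 = (k : Int) := by ring
      rw [h1, PySem.List.pyRange_one_cons (by omega)]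
      simp
    rw [hsplit, List.foldlM_append]
    have ih' := ih (by omega)
    rw [hNj] at ih'
    push_cast [hNj] at ih'
    simp only [add_sub_cancel_right] at ih'
    rw [ih']
    by_cases hhead : (sufF m L2 (L1.drop (k + 1))).headD 0 = m
    · rw [if_pos hhead]
      have : (sufF m L2 (L1.drop k)).headD 0 = m := by
        rw [List.drop_eq_getElem_cons hk, sufF]
        simp only [List.headD_cons, sstepR]
        rw [hhead]
        simp only [lt_irrefl, false_and, if_false]
      rw [if_pos this]
      rfl
    · rw [if_neg hhead]
      have hle : (sufF m L2 (L1.drop (k + 1))).headD 0 ≤ m := sufF_head_le m (by omega) L2 _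
      have hlt : (sufF m L2 (L1.drop (k + 1))).headD 0 < m := lt_of_le_of_ne hle hhead
      have hdrop : L1.drop k = L1[k] :: L1.drop (k + 1) := List.drop_eq_getElem_cons hk
      have hget : PySem.List.pyGetD L1 (k : Int) 0 = L1[k] := by
        rw [PySem.List.pyGetD_eq_getElem L1 0 (by omega) (by omega)]
        simp
      simp only [List.foldlM, fStep1, bind, Except.bind, hget]
      rw [hdrop, sufF]
      simp only [List.headD_cons, sstepR]
      by_cases hcmp : L1[k] ≥ PySem.List.pyGetD L2 (m - 1 - (sufF m L2 (L1.drop (k+1))).headD 0) 0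
      · rw [if_pos hcmp, if_pos (And.intro hlt hcmp)]
        by_cases heq : (sufF m L2 (L1.drop (k+1))).headD 0 + 1 = m
        · rw [if_pos heq]
        · rw [if_neg heq]
          rfl
      · have hc2 : ¬((sufF m L2 (L1.drop (k+1))).headD 0 < m ∧
            L1[k] ≥ PySem.List.pyGetD L2 (m - 1 - (sufF m L2 (L1.drop (k+1))).headD 0) 0) :=
          fun h => hcmp h.2
        rw [if_neg hcmp, if_neg hc2, if_neg hhead]
        rfl

-- A's loop 1 equals the reference suffix array (error 0 exactly when its head reaches m).
lemma loop1A (m : Int) (hm : 1 ≤ m) (L1 L2 : List Int) :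
    (PySem.List.pyRange ((L1.length : Int) - 1) (-1) (-1)).foldlM (fStep1 m L1 L2) [0]
      = if (sufF m L2 L1).headD 0 = m then Except.error 0 else Except.ok (sufF m L2 L1) := by
  have h := loop1A_gen m hm L1 L2 L1.length (le_refl _)
  simpa using h

-- A's enumerate fold is a structural walk over zip L (S.drop (k+1)).
lemma loop2A_walk (m : Int) (L2 S : List Int) (L : List Int) (k : Nat) (st : Int × Int)
    (hlen : k + 1 + L.length ≤ S.length) :
    (PySem.List.enumerate L (k : Int)).foldlM (fStep2 m L2 S) st
      = walkA m L2 (L.zip (S.drop (k + 1))) st := by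
  induction L generalizing k st with
  | nil =>
    simp only [PySem.List.enumerate_nil, List.foldlM_nil]
    rfl
  | cons v t ih =>
    have hk1 : k + 1 < S.length := by simp at hlen; omega
    have hdrop : S.drop (k + 1) = S[k + 1] :: S.drop (k + 1 + 1) := List.drop_eq_getElem_cons hk1
    have hget : PySem.List.pyGetD S ((k : Int) + 1) 0 = S[k + 1] := by
      have : ((k : Int) + 1) = ((k + 1 : Nat) : Int) := by push_cast; ring
      rw [this, PySem.List.pyGetD_eq_getElem S 0 (by omega) (by exact_mod_cast hk1)]
      simp
    rw [PySem.List.enumerate_cons, List.foldlM_cons, hdrop]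
    show (fStep2 m L2 S st ((k : Int), v)) >>= _ = _
    have hlen' : (k + 1) + 1 + t.length ≤ S.length := by
      simp only [List.length_cons] at hlen; omega
    simp only [List.zip_cons_cons, walkA, fStep2, hget]
    by_cases h1 : (if v ≥ PySem.List.pyGetD L2 st.1 0 then st.1 + 1 else st.1) + S[k + 1] ≥ m
    · rw [if_pos h1, if_pos h1]
      rfl
    · rw [if_neg h1, if_neg h1]
      have hcast : ((k : Int) + 1) = ((k + 1 : Nat) : Int) := by push_cast; ring
      by_cases h2 : (if v ≥ PySem.List.pyGetD L2 st.1 0 then st.1 + 1 else st.1) + S[k + 1] = m - 1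
      · rw [if_pos h2, if_pos h2]
        show (PySem.List.enumerate t ((k : Int) + 1)).foldlM (fStep2 m L2 S) _ = _
        rw [hcast, ih (k + 1) _ hlen']
      · rw [if_neg h2, if_neg h2]
        show (PySem.List.enumerate t ((k : Int) + 1)).foldlM (fStep2 m L2 S) _ = _
        rw [hcast, ih (k + 1) _ hlen']

-- ===== basic facts about preAt / sufAt =====

lemma pstepR_ge (m : Int) (L2 : List Int) (p v : Int) : p ≤ pstepR m L2 p v := by
  simp only [pstepR]; split <;> omega
lemma pstepR_le_m (m : Int) (L2 : List Int) (p v : Int) (h : p ≤ m) : pstepR m L2 p v ≤ m := by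
  simp only [pstepR]; split <;> omega
lemma pstepR_nonneg (m : Int) (L2 : List Int) (p v : Int) (h : 0 ≤ p) : 0 ≤ pstepR m L2 p v := by
  simp only [pstepR]; split <;> omega
lemma preAt_succ (m : Int) (L2 L1 : List Int) (t : Nat) (h : t < L1.length) :
    preAt m L2 L1 (t + 1) = pstepR m L2 (preAt m L2 L1 t) L1[t] := by
  unfold preAt
  rw [List.take_add_one, List.getElem?_eq_getElem h]
  rw [Option.toList_some, List.foldl_append, List.foldl_cons, List.foldl_nil]

lemma preAt_nonneg (m : Int) (L2 L1 : List Int) (t : Nat) : 0 ≤ preAt m L2 L1 t := by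
  unfold preAt
  generalize L1.take t = L
  induction L using List.reverseRecOn with
  | nil => simp
  | append_singleton xs x ih => rw [List.foldl_append]; exact pstepR_nonneg _ _ _ _ ih

lemma preAt_le_m (m : Int) (hm : 0 ≤ m) (L2 L1 : List Int) (t : Nat) : preAt m L2 L1 t ≤ m := by
  unfold preAt
  generalize L1.take t = L
  induction L using List.reverseRecOn with
  | nil => simpa
  | append_singleton xs x ih => rw [List.foldl_append]; exact pstepR_le_m _ _ _ _ ih

lemma preAt_mono (m : Int) (L2 L1 : List Int) {t t' : Nat} (h : t ≤ t') :
    preAt m L2 L1 t ≤ preAt m L2 L1 t' := by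
  induction t' with
  | zero => simp_all
  | succ u ih =>
    rcases Nat.lt_or_ge u L1.length with hu | hu
    · rcases Nat.eq_or_lt_of_le h with rfl | hlt
      · exact le_refl _
      · exact le_trans (ih (by omega)) (by rw [preAt_succ m L2 L1 u hu]; exact pstepR_ge _ _ _ _)
    · have : preAt m L2 L1 (u + 1) = preAt m L2 L1 u := by
        unfold preAt
        rw [List.take_of_length_le (by omega), List.take_of_length_le (by omega)]
      rcases Nat.eq_or_lt_of_le h with rfl | hlt
      · exact le_refl _
      · rw [this]; exact ih (by omega)

lemma sufAt_of_ge (m : Int) (L2 L1 : List Int) (t : Nat) (h : L1.length ≤ t) :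
    sufAt m L2 L1 t = 0 := by
  unfold sufAt
  rw [List.drop_of_length_le h]
  simp [sufF]

lemma sufAt_succ (m : Int) (L2 L1 : List Int) (t : Nat) (h : t < L1.length) :
    sufAt m L2 L1 t = sstepR m L2 (sufAt m L2 L1 (t + 1)) L1[t] := by
  unfold sufAt
  rw [List.drop_eq_getElem_cons h, sufF]
  simp

lemma sufAt_nonneg (m : Int) (L2 L1 : List Int) (t : Nat) : 0 ≤ sufAt m L2 L1 t := by
  unfold sufAt
  obtain ⟨a, t', h⟩ := List.exists_cons_of_ne_nil (sufF_ne_nil m L2 (L1.drop t))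
  rw [h]
  exact sufF_mem_nonneg m L2 _ a (by rw [h]; exact List.mem_cons_self)

lemma sufAt_anti (m : Int) (L2 L1 : List Int) {t t' : Nat} (h : t ≤ t') :
    sufAt m L2 L1 t' ≤ sufAt m L2 L1 t := by
  induction t' with
  | zero => simp_all
  | succ u ih =>
    rcases Nat.eq_or_lt_of_le h with rfl | hlt
    · exact le_refl _
    · refine le_trans ?_ (ih (by omega))
      rcases Nat.lt_or_ge u L1.length with hu | hu
      · rw [sufAt_succ m L2 L1 u hu]
        simp only [sstepR]; split <;> omega
      · rw [sufAt_of_ge m L2 L1 u hu, sufAt_of_ge m L2 L1 (u+1) (by omega)]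

-- ===== getElem bridges for preTail / sufF =====

lemma length_preTail (m : Int) (L2 : List Int) (p : Int) (L : List Int) :
    (preTail m L2 p L).length = L.length := by
  induction L generalizing p with
  | nil => rfl
  | cons v t ih => simp [preTail, ih]

lemma preTail_getElem (m : Int) (L2 : List Int) (L : List Int) (p : Int) (t : Nat)
    (h : t < (preTail m L2 p L).length) :
    (preTail m L2 p L)[t] = (L.take (t + 1)).foldl (pstepR m L2) p := by
  induction L generalizing p t with
  | nil => simp [preTail] at h
  | cons v tl ih =>
    cases t with
    | zero => simp [preTail]
    | succ u =>
      simp only [preTail, List.getElem_cons_succ, List.take_succ_cons, List.foldl_cons]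
      exact ih (pstepR m L2 p v) u (by simp [preTail, length_preTail] at h ⊢; omega)

lemma sufF_getElem (m : Int) (L2 L : List Int) (t : Nat) (h : t < (sufF m L2 L).length) :
    (sufF m L2 L)[t] = (sufF m L2 (L.drop t)).headD 0 := by
  induction L generalizing t with
  | nil =>
    rw [sufF_length] at h
    simp at h
    subst h
    simp [sufF]
  | cons v tl ih =>
    cases t with
    | zero =>
      simp [sufF]
    | succ u =>
      simp only [sufF, List.getElem_cons_succ, List.drop_succ_cons]
      exact ih u (by rw [sufF_length] at h ⊢; simp at h ⊢; omega)

-- ===== walkA characterized: error 0 iff some pair sum reaches m; else ok with a running min =====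

lemma walkA_err (m : Int) (L2 : List Int) : ∀ (L sufT : List Int) (p ans : Int), 0 ≤ p → p < m →
    (∀ x ∈ sufT, 0 ≤ x) →
    (((preTail m L2 p L).zip sufT).any (fun q => decide (m ≤ q.1 + q.2)) = true) →
    walkA m L2 (L.zip sufT) (p, ans) = Except.error 0 := by
  intro L
  induction L with
  | nil => intro sufT p ans _ _ _ hany; simp [preTail] at hany
  | cons v t ih =>
    intro sufT p ans hp0 hpm hS hany
    cases sufT with
    | nil => simp [preTail] at hany
    | cons s0 rest =>
      have hs0 : 0 ≤ s0 := hS s0 List.mem_cons_self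
      have hupd : pstepR m L2 p v = (if v ≥ PySem.List.pyGetD L2 p 0 then p + 1 else p) := by
        simp only [pstepR]
        by_cases hc : v ≥ PySem.List.pyGetD L2 p 0
        · rw [if_pos ⟨hpm, hc⟩, if_pos hc]
        · rw [if_neg (fun h => hc h.2), if_neg hc]
      simp only [preTail, List.zip_cons_cons, walkA, List.any_cons, ← hupd] at hany ⊢
      by_cases hge : pstepR m L2 p v + s0 ≥ m
      · rw [if_pos hge]
      · rw [if_neg hge]
        have hany' : ((preTail m L2 (pstepR m L2 p v) t).zip rest).any (fun q => decide (m ≤ q.1 + q.2)) = true := by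
          simp only [Bool.or_eq_true, decide_eq_true_eq] at hany
          rcases hany with h | h
          · omega
          · simpa using h
        have hp'm : pstepR m L2 p v < m := by
          have := pstepR_le_m m L2 p v (by omega)
          omega
        have hp'0 := pstepR_nonneg m L2 p v hp0
        by_cases heq : pstepR m L2 p v + s0 = m - 1
        · rw [if_pos heq]
          exact ih rest (pstepR m L2 p v) _ hp'0 hp'm (fun x hx => hS x (List.mem_cons_of_mem _ hx)) hany'
        · rw [if_neg heq]
          exact ih rest (pstepR m L2 p v) _ hp'0 hp'm (fun x hx => hS x (List.mem_cons_of_mem _ hx)) hany'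

lemma walkA_ok (m : Int) (L2 : List Int) : ∀ (L sufT : List Int) (p ans : Int), 0 ≤ p → p < m →
    (∀ x ∈ sufT, 0 ≤ x) →
    (((preTail m L2 p L).zip sufT).any (fun q => decide (m ≤ q.1 + q.2)) = false) →
    ∃ q : Int, walkA m L2 (L.zip sufT) (p, ans) = Except.ok (q,
      ((((preTail m L2 p L).zip sufT).filter (fun q => q.1 + q.2 == m - 1)).map
        (fun q => PySem.List.pyGetD L2 q.1 0)).foldl min ans) := by
  intro L
  induction L with
  | nil =>
    intro sufT p ans _ _ _ _
    exact ⟨p, by simp [preTail, walkA]⟩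
  | cons v t ih =>
    intro sufT p ans hp0 hpm hS hany
    cases sufT with
    | nil => exact ⟨p, by simp [walkA]⟩
    | cons s0 rest =>
      have hs0 : 0 ≤ s0 := hS s0 List.mem_cons_self
      have hupd : pstepR m L2 p v = (if v ≥ PySem.List.pyGetD L2 p 0 then p + 1 else p) := by
        simp only [pstepR]
        by_cases hc : v ≥ PySem.List.pyGetD L2 p 0
        · rw [if_pos ⟨hpm, hc⟩, if_pos hc]
        · rw [if_neg (fun h => hc h.2), if_neg hc]
      simp only [preTail, List.zip_cons_cons, walkA, List.any_cons, ← hupd] at hany ⊢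
      simp only [Bool.or_eq_false_iff, decide_eq_false_iff_not] at hany
      obtain ⟨hhead, hrest⟩ := hany
      rw [if_neg (by omega : ¬(pstepR m L2 p v + s0 ≥ m))]
      have hp'm : pstepR m L2 p v < m := by
        have := pstepR_le_m m L2 p v (by omega)
        omega
      have hp'0 := pstepR_nonneg m L2 p v hp0
      have hSr : ∀ x ∈ rest, 0 ≤ x := fun x hx => hS x (List.mem_cons_of_mem _ hx)
      by_cases heq : pstepR m L2 p v + s0 = m - 1
      · rw [if_pos heq, List.filter_cons_of_pos (by simpa using heq)]
        simp only [List.map_cons, List.foldl_cons]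
        exact ih rest (pstepR m L2 p v) (min ans (PySem.List.pyGetD L2 (pstepR m L2 p v) 0)) hp'0 hp'm hSr hrest
      · rw [if_neg heq, List.filter_cons_of_neg (by simpa using heq)]
        exact ih rest (pstepR m L2 p v) ans hp'0 hp'm hSr hrest

-- ===== the F/G loop invariants =====

lemma pyGetD_set (F : List Int) (k : Nat) (v : Int) (j : Int) (hk : k < F.length)
    (hj0 : 0 ≤ j) (hjl : j < (F.length : Int)) :
    PySem.List.pyGetD (F.set k v) j 0 = if j = (k : Int) then v else PySem.List.pyGetD F j 0 := by
  rw [PySem.List.pyGetD_eq_getElem (F.set k v) 0 hj0 (by simpa using hjl),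
      PySem.List.pyGetD_eq_getElem F 0 hj0 hjl]
  rw [List.getElem_set]
  by_cases h : j = (k : Int)
  · rw [if_pos h, if_pos (by omega)]
  · rw [if_neg h, if_neg (by omega)]

lemma pyGetD_init (nv m : Int) (hm : 1 ≤ m) (j : Int) (hj0 : 0 ≤ j) (hjm : j ≤ m) :
    PySem.List.pyGetD ((List.replicate (m + 1).toNat nv).set 0 0) j 0 = if j = 0 then 0 else nv := by
  rw [PySem.List.pyGetD_eq_getElem _ 0 hj0 (by simp; omega)]
  rw [List.getElem_set]
  simp only [List.getElem_replicate]
  by_cases h : j = 0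
  · rw [if_pos (by omega), if_pos h]
  · rw [if_neg (by omega), if_neg h]

-- the invariant carried through B's F loop
def FInv (n m : Int) (L2 L1 : List Int) (t : Nat) (st : List Int × Int) : Prop :=
  st.2 = preAt m L2 L1 t ∧ st.1.length = (m + 1).toNat ∧
  ∀ j : Int, 0 ≤ j → j ≤ m →
    ((j ≤ st.2 → 0 ≤ PySem.List.pyGetD st.1 j 0 ∧
        ∀ t' : Nat, (PySem.List.pyGetD st.1 j 0 ≤ (t' : Int) ↔ j ≤ preAt m L2 L1 t'))
     ∧ (st.2 < j → PySem.List.pyGetD st.1 j 0 = n + 1))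

lemma FInv_fold (n m : Int) (hm : 1 ≤ m) (L2 L1 : List Int) (hn : n = (L1.length : Int)) :
    ∀ t : Nat, (t : Int) ≤ n →
    FInv n m L2 L1 t ((PySem.List.pyRange 0 (t : Int) 1).foldl (fAltFStep m L1 L2)
      ((List.replicate (m + 1).toNat (n + 1)).set 0 0, 0)) := by
  intro t
  induction t with
  | zero =>
    intro _
    rw [show ((0 : Nat) : Int) = 0 from rfl, PySem.List.pyRange_one_eq_nil (le_refl 0)]
    simp only [List.foldl_nil]
    refine ⟨rfl, by simp, ?_⟩
    intro j hj0 hjm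
    constructor
    · intro hj
      have hj00 : j = 0 := le_antisymm hj hj0
      subst hj00
      rw [pyGetD_init (n + 1) m hm 0 (le_refl 0) (by omega), if_pos rfl]
      refine ⟨le_refl 0, ?_⟩
      intro t'
      constructor
      · intro _; exact preAt_nonneg m L2 L1 t'
      · intro _; exact_mod_cast Int.ofNat_nonneg t'
    · intro hj
      rw [pyGetD_init (n + 1) m hm j hj0 hjm, if_neg (by omega)]
  | succ t ih =>
    intro ht
    have htn : (t : Int) < n := by push_cast at ht; omega
    have htN : t < L1.length := by omega
    obtain ⟨h1, h2, h3⟩ := ih (by omega)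
    set st := (PySem.List.pyRange 0 (t : Int) 1).foldl (fAltFStep m L1 L2)
      ((List.replicate (m + 1).toNat (n + 1)).set 0 0, 0) with hst
    rw [show (((t + 1 : Nat)) : Int) = (t : Int) + 1 by push_cast; ring]
    rw [PySem.List.pyRange_one_succ_right (by exact_mod_cast Int.ofNat_nonneg t)]
    rw [List.foldl_append, List.foldl_cons, List.foldl_nil, ← hst]
    have hget : PySem.List.pyGetD L1 (t : Int) 0 = L1[t] := by
      rw [PySem.List.pyGetD_eq_getElem L1 0 (by omega) (by omega)]
      simp
    have hp0 : 0 ≤ st.2 := h1 ▸ preAt_nonneg m L2 L1 t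
    have hpm : st.2 ≤ m := h1 ▸ preAt_le_m m (by omega) L2 L1 t
    have hsucc : preAt m L2 L1 (t + 1) = pstepR m L2 (preAt m L2 L1 t) L1[t] :=
      preAt_succ m L2 L1 t htN
    unfold fAltFStep
    by_cases hc : st.2 < m ∧ PySem.List.pyGetD L1 (t : Int) 0 ≥ PySem.List.pyGetD L2 st.2 0
    · rw [if_pos hc]
      have hpre1 : preAt m L2 L1 (t + 1) = st.2 + 1 := by
        rw [hsucc, ← h1]
        unfold pstepR
        rw [if_pos ⟨hc.1, hget ▸ hc.2⟩]
      have hset : ∀ (j : Int), 0 ≤ j → j ≤ m →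
          PySem.List.pyGetD (st.1.set (st.2 + 1).toNat ((t : Int) + 1)) j 0
            = if j = st.2 + 1 then (t : Int) + 1 else PySem.List.pyGetD st.1 j 0 := by
        intro j hj0 hjm
        rw [pyGetD_set _ _ _ _ (by rw [h2]; omega) hj0 (by rw [h2]; push_cast; omega)]
        rw [Int.toNat_of_nonneg (by omega)]
      refine ⟨hpre1.symm, by simpa using h2, ?_⟩
      intro j hj0 hjm
      constructor
      · intro hj
        by_cases hje : j = st.2 + 1
        · rw [hset j hj0 hjm, if_pos hje]
          refine ⟨by omega, ?_⟩
          intro t'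
          constructor
          · intro ht'
            have ht'' : t + 1 ≤ t' := by exact_mod_cast ht'
            rw [hje, ← hpre1]
            exact preAt_mono m L2 L1 ht''
          · intro hj'
            by_contra hcon
            push_neg at hcon
            have ht'' : t' ≤ t := by
              by_contra hcc
              push_neg at hcc
              have : ((t : Int)) + 1 ≤ (t' : Int) := by exact_mod_cast hcc
              omega
            have := preAt_mono m L2 L1 ht''
            rw [← h1] at this
            omega
        · have hjle : j ≤ st.2 := by omega
          rw [hset j hj0 hjm, if_neg hje]
          exact (h3 j hj0 hjm).1 hjle
      · intro hj
        rw [hset j hj0 hjm, if_neg (by omega)]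
        exact (h3 j hj0 hjm).2 (by omega)
    · rw [if_neg hc]
      have hpre1 : preAt m L2 L1 (t + 1) = st.2 := by
        rw [hsucc, ← h1]
        unfold pstepR
        rw [if_neg (by rw [hget] at hc; exact fun h => hc ⟨h.1, h.2⟩)]
      exact ⟨hpre1.symm, h2, h3⟩

-- ===== B's suffix fold builds the reference suffix array =====

lemma bsuf_gen (m : Int) (L2 L1 : List Int) :
    ∀ j : Nat, j ≤ L1.length →
    (PySem.List.pyRange ((L1.length : Int) - 1) (((L1.length - j : Nat) : Int) - 1) (-1)).foldl (fAltSufStep m L1 L2) [0]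
      = sufF m L2 (L1.drop (L1.length - j)) := by
  intro j
  induction j with
  | zero =>
    intro _
    simp only [Nat.sub_zero, List.drop_length]
    rw [PySem.List.pyRange_neg_one_eq_nil (by omega)]
    simp [sufF]
  | succ j ih =>
    intro hj
    have hk : L1.length - (j + 1) < L1.length := by omega
    have hNj : L1.length - j = (L1.length - (j + 1)) + 1 := by omega
    set k : Nat := L1.length - (j + 1) with hkdef
    have hsplit : PySem.List.pyRange ((L1.length : Int) - 1) ((k : Int) - 1) (-1)
        = PySem.List.pyRange ((L1.length : Int) - 1) (k : Int) (-1) ++ [(k : Int)] := by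
      rw [PySem.List.pyRange_neg_one_eq_reverse, PySem.List.pyRange_neg_one_eq_reverse]
      have h1 : ((k : Int) - 1) + 1 = (k : Int) := by ring
      rw [h1, PySem.List.pyRange_one_cons (by omega)]
      simp
    rw [hsplit, List.foldl_append]
    have ih' := ih (by omega)
    rw [hNj] at ih'
    push_cast [hNj] at ih'
    simp only [add_sub_cancel_right] at ih'
    rw [ih']
    have hget : PySem.List.pyGetD L1 (k : Int) 0 = L1[k] := by
      rw [PySem.List.pyGetD_eq_getElem L1 0 (by omega) (by omega)]
      simp
    have hdrop : L1.drop k = L1[k] :: L1.drop (k + 1) := List.drop_eq_getElem_cons hk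
    rw [List.foldl_cons, List.foldl_nil]
    show fAltSufStep m L1 L2 (sufF m L2 (L1.drop (k + 1))) (k : Int) = _
    unfold fAltSufStep
    simp only [hget]
    rw [hdrop, sufF]
    rfl

lemma bsuf_eq (m : Int) (L2 L1 : List Int) :
    (PySem.List.pyRange ((L1.length : Int) - 1) (-1) (-1)).foldl (fAltSufStep m L1 L2) [0]
      = sufF m L2 L1 := by
  have h := bsuf_gen m L2 L1 L1.length (le_refl _)
  simpa using h

-- B's suffix fold prepends only nonnegative cells.
lemma bsuf_nonneg (m : Int) (L1 L2 : List Int) (rng : List Int) :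
    ∀ acc : List Int, (∀ x ∈ acc, 0 ≤ x) →
    ∀ x ∈ rng.foldl (fAltSufStep m L1 L2) acc, 0 ≤ x := by
  induction rng with
  | nil => exact fun acc h => h
  | cons i rest ih =>
    intro acc hacc
    rw [List.foldl_cons]
    refine ih _ ?_
    intro x hx
    have hs : 0 ≤ acc.headD 0 := by
      cases acc with
      | nil => simp
      | cons a t => exact hacc a List.mem_cons_self
    rw [show fAltSufStep m L1 L2 acc i
        = (if acc.headD 0 < m ∧ PySem.List.pyGetD L1 i 0 ≥ PySem.List.pyGetD L2 (m - 1 - acc.headD 0) 0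
            then acc.headD 0 + 1 else acc.headD 0) :: acc from rfl] at hx
    rcases List.mem_cons.1 hx with hx' | hx'
    · subst hx'
      split <;> omega
    · exact hacc x hx'

-- pyGetD into the reference suffix array is sufAt.
lemma sufF_pyGetD (m : Int) (L2 L1 : List Int) (t : Int) (h0 : 0 ≤ t) (hle : t ≤ (L1.length : Int)) :
    PySem.List.pyGetD (sufF m L2 L1) t 0 = sufAt m L2 L1 t.toNat := by
  rw [PySem.List.pyGetD_eq_getElem _ 0 h0 (by rw [sufF_length]; push_cast; omega)]
  exact sufF_getElem m L2 L1 t.toNat (by rw [sufF_length]; omega)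

-- ===== min equality =====

-- B's running minimum as an Option, and the final decode of the combine loop.
def ofold (b : Option Int) (c : Int) : Option Int :=
  if (match b with | none => true | some b0 => decide (c < b0)) then some c else b

def encodeO : Option Int → Int
  | none => -1
  | some b => b

def finalInt (e : Except Int (Option Int)) : Int :=
  match e with
  | Except.error r => r
  | Except.ok b => encodeO b

lemma ofold_some (ds : List Int) : ∀ b0 : Int,
    ∃ v, ds.foldl ofold (some b0) = some v ∧ (v = b0 ∨ v ∈ ds) ∧ v ≤ b0 ∧ ∀ x ∈ ds, v ≤ x := by
  induction ds with
  | nil => exact fun b0 => ⟨b0, rfl, Or.inl rfl, le_refl _, by simp⟩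
  | cons c t ih =>
    intro b0
    rw [List.foldl_cons]
    by_cases hc : c < b0
    · rw [show ofold (some b0) c = some c from by unfold ofold; rw [if_pos (by simpa using hc)]]
      obtain ⟨v, h1, h2, h3, h4⟩ := ih c
      refine ⟨v, h1, ?_, by omega, ?_⟩
      · rcases h2 with rfl | h
        · exact Or.inr List.mem_cons_self
        · exact Or.inr (List.mem_cons_of_mem _ h)
      · intro x hx
        rcases List.mem_cons.1 hx with rfl | hx'
        · omega
        · exact h4 x hx'
    · rw [show ofold (some b0) c = some b0 from by unfold ofold; rw [if_neg (by simpa using hc)]]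
      obtain ⟨v, h1, h2, h3, h4⟩ := ih b0
      refine ⟨v, h1, ?_, h3, ?_⟩
      · rcases h2 with rfl | h
        · exact Or.inl rfl
        · exact Or.inr (List.mem_cons_of_mem _ h)
      · intro x hx
        rcases List.mem_cons.1 hx with rfl | hx'
        · omega
        · exact h4 x hx'

lemma values_eq (cs ds : List Int) (hb : ∀ x ∈ cs, x < (1 : Int) <<< 60)
    (hmem : ∀ x : Int, x ∈ cs ↔ x ∈ ds) :
    (if cs.foldl min ((1 : Int) <<< 60) = (1 : Int) <<< 60 then (-1 : Int)
      else cs.foldl min ((1 : Int) <<< 60))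
    = encodeO (ds.foldl ofold none) := by
  cases ds with
  | nil =>
    have hcs : cs = [] := by
      cases cs with
      | nil => rfl
      | cons c ct =>
        have := (hmem c).1 List.mem_cons_self
        simp at this
    subst hcs
    simp [encodeO]
  | cons d dt =>
    rw [List.foldl_cons, show ofold none d = some d from rfl]
    obtain ⟨y, h1, h2, h3, h4⟩ := ofold_some dt d
    rw [h1]
    have hyds : y ∈ d :: dt := by
      rcases h2 with rfl | h
      · exact List.mem_cons_self
      · exact List.mem_cons_of_mem _ h
    have hymin : ∀ x ∈ d :: dt, y ≤ x := by
      intro x hx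
      rcases List.mem_cons.1 hx with rfl | hx'
      · exact h3
      · exact h4 x hx'
    have hycs : y ∈ cs := (hmem y).2 hyds
    have hle := PySem.List.foldl_min_le cs ((1 : Int) <<< 60)
    have hvcs : cs.foldl min ((1 : Int) <<< 60) ∈ cs := by
      rcases PySem.List.foldl_min_mem cs ((1 : Int) <<< 60) with h | h
      · exfalso
        have ha := hle.2 y hycs
        have hbb := hb y hycs
        omega
      · exact h
    have hvlt := hb _ hvcs
    rw [if_neg (by omega)]
    have ha : y ≤ cs.foldl min ((1 : Int) <<< 60) := hymin _ ((hmem _).1 hvcs)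
    have hbb : cs.foldl min ((1 : Int) <<< 60) ≤ y := hle.2 y hycs
    show cs.foldl min ((1 : Int) <<< 60) = y
    omega

-- ===== the combine loop characterized =====

lemma comb_char (n m : Int) (L2 suf F : List Int)
    (hmono : ∀ j j' : Int, 0 ≤ j → j ≤ j' → j' < m →
      PySem.List.pyGetD F j 0 > n → PySem.List.pyGetD F j' 0 > n) :
    ∀ (k : Nat) (j0 : Int) (best : Option Int), 0 ≤ j0 → j0 + (k : Int) = m →
    finalInt ((PySem.List.pyRange j0 m 1).foldlM (fAltCombStep n m L2 suf F) best)
      = if (PySem.List.pyRange j0 m 1).any (fun j =>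
            decide (PySem.List.pyGetD F j 0 ≤ n ∧
              m ≤ j + PySem.List.pyGetD suf (PySem.List.pyGetD F j 0) 0)) then 0
        else encodeO ((((PySem.List.pyRange j0 m 1).filter (fun j =>
            decide (PySem.List.pyGetD F j 0 ≤ n ∧
              j + PySem.List.pyGetD suf (PySem.List.pyGetD F j 0) 0 = m - 1))).map
            (fun j => PySem.List.pyGetD L2 j 0)).foldl ofold best) := by
  intro k
  induction k with
  | zero =>
    intro j0 best h0 hk
    rw [PySem.List.pyRange_one_eq_nil (by omega)]
    rfl
  | succ k ih =>
    intro j0 best h0 hk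
    have hlt : j0 < m := by omega
    have hkk : j0 + 1 + (k : Int) = m := by push_cast at hk ⊢; omega
    rw [PySem.List.pyRange_one_cons hlt, List.foldlM_cons, List.any_cons, List.filter_cons]
    by_cases hbr : PySem.List.pyGetD F j0 0 > n
    · rw [show fAltCombStep n m L2 suf F best j0 = Except.error (encodeO best) from by
        unfold fAltCombStep
        rw [if_pos hbr]
        cases best <;> rfl]
      have hrest : ∀ j ∈ PySem.List.pyRange (j0 + 1) m 1, PySem.List.pyGetD F j 0 > n := by
        intro j hj
        rw [PySem.List.mem_pyRange_one] at hj
        exact hmono j0 j h0 (by omega) (by omega) hbr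
      have hany : (PySem.List.pyRange (j0 + 1) m 1).any (fun j =>
          decide (PySem.List.pyGetD F j 0 ≤ n ∧
            m ≤ j + PySem.List.pyGetD suf (PySem.List.pyGetD F j 0) 0)) = false := by
        rw [List.any_eq_false]
        intro j hj
        simp only [decide_eq_true_eq, not_and]
        intro hle
        exact absurd hle (by have := hrest j hj; omega)
      have hfil : (PySem.List.pyRange (j0 + 1) m 1).filter (fun j =>
          decide (PySem.List.pyGetD F j 0 ≤ n ∧
            j + PySem.List.pyGetD suf (PySem.List.pyGetD F j 0) 0 = m - 1)) = [] := by
        rw [List.filter_eq_nil_iff]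
        intro j hj
        simp only [decide_eq_true_eq, not_and]
        intro hle
        exact absurd hle (by have := hrest j hj; omega)
      rw [hany, hfil]
      rw [if_neg (show ¬(((decide (PySem.List.pyGetD F j0 0 ≤ n ∧
            m ≤ j0 + PySem.List.pyGetD suf (PySem.List.pyGetD F j0 0) 0)) || false) = true) from by
        simp only [Bool.or_false, decide_eq_true_eq]
        intro h
        exact absurd h.1 (by omega))]
      rw [if_neg (show ¬((decide (PySem.List.pyGetD F j0 0 ≤ n ∧
            j0 + PySem.List.pyGetD suf (PySem.List.pyGetD F j0 0) 0 = m - 1)) = true) from by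
        simp only [decide_eq_true_eq]
        intro h
        exact absurd h.1 (by omega))]
      rfl
    · have hble : PySem.List.pyGetD F j0 0 ≤ n := by omega
      by_cases hz : m ≤ j0 + PySem.List.pyGetD suf (PySem.List.pyGetD F j0 0) 0
      · rw [show fAltCombStep n m L2 suf F best j0 = Except.error 0 from by
          unfold fAltCombStep
          rw [if_neg (by omega), if_pos hz]]
        rw [if_pos (by simp only [Bool.or_eq_true, decide_eq_true_eq]; left; exact ⟨hble, hz⟩)]
        rfl
      · have hd0 : (decide (PySem.List.pyGetD F j0 0 ≤ n ∧
            m ≤ j0 + PySem.List.pyGetD suf (PySem.List.pyGetD F j0 0) 0)) = false := by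
          simp only [decide_eq_false_iff_not, not_and]
          intro _
          omega
        by_cases hc : j0 + PySem.List.pyGetD suf (PySem.List.pyGetD F j0 0) 0 = m - 1
        · rw [show fAltCombStep n m L2 suf F best j0
              = Except.ok (ofold best (PySem.List.pyGetD L2 j0 0)) from by
            unfold fAltCombStep
            rw [if_neg (by omega), if_neg (by omega), if_pos hc]
            rfl]
          rw [if_pos (show (decide (PySem.List.pyGetD F j0 0 ≤ n ∧
              j0 + PySem.List.pyGetD suf (PySem.List.pyGetD F j0 0) 0 = m - 1)) = true from by
            simp only [decide_eq_true_eq]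
            exact ⟨hble, hc⟩)]
          rw [List.map_cons, List.foldl_cons]
          show finalInt ((PySem.List.pyRange (j0 + 1) m 1).foldlM (fAltCombStep n m L2 suf F)
            (ofold best (PySem.List.pyGetD L2 j0 0))) = _
          rw [ih (j0 + 1) (ofold best (PySem.List.pyGetD L2 j0 0)) (by omega) hkk]
          rw [hd0, Bool.false_or]
        · rw [show fAltCombStep n m L2 suf F best j0 = Except.ok best from by
            unfold fAltCombStep
            rw [if_neg (by omega), if_neg (by omega), if_neg hc]]
          rw [if_neg (show ¬((decide (PySem.List.pyGetD F j0 0 ≤ n ∧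
              j0 + PySem.List.pyGetD suf (PySem.List.pyGetD F j0 0) 0 = m - 1)) = true) from by
            simp only [decide_eq_true_eq]
            intro h
            exact absurd h.2 hc)]
          show finalInt ((PySem.List.pyRange (j0 + 1) m 1).foldlM (fAltCombStep n m L2 suf F) best) = _
          rw [ih (j0 + 1) best (by omega) hkk]
          rw [hd0, Bool.false_or]


-- ===== the main equivalence on n = len(L1), 1 ≤ m =====

lemma L2_val_bound (n m : Int) (L1 L2 : List Int) (hdom : Dom_f n m L1 L2) :
    ∀ j : Int, PySem.List.pyGetD L2 j 0 ≤ 2147483648 := by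
  intro j
  by_cases hin : PySem.Raise.InRange L2.length j
  · have hmem := PySem.List.pyGetD_mem L2 0 hin
    simp only [Dom_f, pvDomInt, Bool.and_eq_true, List.all_eq_true, decide_eq_true_eq] at hdom
    exact (hdom.2 _ hmem).2
  · have h0 : PySem.List.pyGetD L2 j 0 = 0 := by
      rw [PySem.List.pyGetD_of_none]
      rw [PySem.List.pyGet?_eq_none_iff]
      exact hin
    omega

lemma mem_zip_iff (X Y : List Int) (h : X.length = Y.length) (q : Int × Int) :
    q ∈ X.zip Y ↔ ∃ (i : Nat) (h1 : i < X.length) (h2 : i < Y.length), q = (X[i], Y[i]) := by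
  constructor
  · intro hq
    obtain ⟨i, hi, hget⟩ := List.mem_iff_getElem.1 hq
    have hiX : i < X.length := by simpa [List.length_zip, h] using hi
    exact ⟨i, hiX, by omega, by rw [← hget]; simp [List.getElem_zip]⟩
  · rintro ⟨i, h1, h2, rfl⟩
    exact List.mem_iff_getElem.2 ⟨i, by simp [List.length_zip]; omega, by simp [List.getElem_zip]⟩

-- A written out over the list of split-point pairs (preAt t, sufAt t), t = 0..n.
lemma fA_char (m : Int) (hm : 1 ≤ m) (L1 L2 : List Int)
    (hval : ∀ j : Int, PySem.List.pyGetD L2 j 0 ≤ 2147483648) :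
    f (L1.length : Int) m L1 L2 =
      if ((0 :: preTail m L2 0 L1).zip (sufF m L2 L1)).any (fun q => decide (m ≤ q.1 + q.2)) then 0
      else
        if ((((0 :: preTail m L2 0 L1).zip (sufF m L2 L1)).filter (fun q => q.1 + q.2 == m - 1)).map
            (fun q => PySem.List.pyGetD L2 q.1 0)).foldl min ((1 : Int) <<< 60) = (1 : Int) <<< 60
        then -1
        else ((((0 :: preTail m L2 0 L1).zip (sufF m L2 L1)).filter (fun q => q.1 + q.2 == m - 1)).map
            (fun q => PySem.List.pyGetD L2 q.1 0)).foldl min ((1 : Int) <<< 60) := by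
  obtain ⟨s0, S', hSc⟩ := List.exists_cons_of_ne_nil (sufF_ne_nil m L2 L1)
  have hs0le : s0 ≤ m := by
    have := sufF_head_le m (by omega) L2 L1
    rw [hSc] at this
    simpa using this
  have hS'nn : ∀ x ∈ S', 0 ≤ x :=
    fun x hx => sufF_mem_nonneg m L2 L1 x (by rw [hSc]; exact List.mem_cons_of_mem _ hx)
  have hS'len : S'.length = L1.length := by
    have := sufF_length m L2 L1
    rw [hSc] at this
    simpa using this
  unfold f
  rw [loop1A m hm L1 L2, hSc]
  simp only [List.headD_cons, List.zip_cons_cons, List.any_cons]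
  by_cases hs0 : s0 = m
  · rw [if_pos hs0, if_pos (by simp only [Bool.or_eq_true, decide_eq_true_eq]; left; omega)]
  · rw [if_neg hs0]
    have hs0lt : s0 < m := lt_of_le_of_ne hs0le hs0
    show (match (PySem.List.enumerate L1).foldlM (fStep2 m L2 (s0 :: S'))
        (0, if PySem.List.pyGetD (s0 :: S') 0 0 = m - 1 then PySem.List.pyGetD L2 0 0 else (1 : Int) <<< 60) with
      | Except.error r => r
      | Except.ok st => if st.2 = (1 : Int) <<< 60 then -1 else st.2) = _
    rw [PySem.List.pyGetD_zero_cons]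
    have hwalk := loop2A_walk m L2 (s0 :: S') L1 0
      (0, if s0 = m - 1 then PySem.List.pyGetD L2 0 0 else (1 : Int) <<< 60)
      (by simp only [List.length_cons, hS'len]; omega)
    norm_num at hwalk
    rw [hwalk]
    by_cases hany : ((preTail m L2 0 L1).zip S').any (fun q => decide (m ≤ q.1 + q.2)) = true
    · rw [walkA_err m L2 L1 S' 0 _ (le_refl 0) (by omega) hS'nn hany,
        if_pos (by rw [hany]; simp)]
    · have hanyf : ((preTail m L2 0 L1).zip S').any (fun q => decide (m ≤ q.1 + q.2)) = false :=
        by rwa [Bool.not_eq_true] at hany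
      obtain ⟨q, hq⟩ := walkA_ok m L2 L1 S' 0
        (if s0 = m - 1 then PySem.List.pyGetD L2 0 0 else (1 : Int) <<< 60)
        (le_refl 0) (by omega) hS'nn hanyf
      rw [hq]
      have hcond : ¬((decide (m ≤ 0 + s0) ||
          ((preTail m L2 0 L1).zip S').any (fun q => decide (m ≤ q.1 + q.2))) = true) := by
        rw [hanyf]
        simp only [Bool.or_false, Bool.not_eq_true, decide_eq_false_iff_not]
        omega
      by_cases hseed : s0 = m - 1
      · rw [if_pos hseed, if_neg hcond,
          List.filter_cons_of_pos (by simp; omega), List.map_cons, List.foldl_cons]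
        have hmin : min ((1 : Int) <<< 60) (PySem.List.pyGetD L2 ((0 : Int), s0).1 0)
            = PySem.List.pyGetD L2 ((0 : Int), s0).1 0 :=
          min_eq_right (by have := hval ((0 : Int), s0).1; rw [shift60]; omega)
        rw [hmin]
      · rw [if_neg hseed, if_neg hcond,
          List.filter_cons_of_neg (by simp; omega)]

-- the pairs walked by A are exactly (preAt t, sufAt t) for t = 0..n
lemma zip_pairs_mem (m : Int) (L2 L1 : List Int) (q : Int × Int) :
    q ∈ (0 :: preTail m L2 0 L1).zip (sufF m L2 L1) ↔
      ∃ t : Nat, t ≤ L1.length ∧ q = (preAt m L2 L1 t, sufAt m L2 L1 t) := by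
  rw [mem_zip_iff _ _ (by simp [length_preTail, sufF_length])]
  have hcomp : ∀ (i : Nat) (h1 : i < (0 :: preTail m L2 0 L1).length) (h2 : i < (sufF m L2 L1).length),
      ((0 :: preTail m L2 0 L1)[i], (sufF m L2 L1)[i]) = (preAt m L2 L1 i, sufAt m L2 L1 i) := by
    intro i h1 h2
    have hsuf : (sufF m L2 L1)[i] = sufAt m L2 L1 i := sufF_getElem m L2 L1 i h2
    cases i with
    | zero => rw [hsuf]; rfl
    | succ u =>
      rw [hsuf]
      have hu : u < (preTail m L2 0 L1).length := by simpa using h1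
      show ((preTail m L2 0 L1)[u], _) = _
      rw [preTail_getElem m L2 L1 0 u hu]
      rfl
  constructor
  · rintro ⟨i, h1, h2, rfl⟩
    exact ⟨i, by simp [length_preTail] at h1; omega, (hcomp i h1 h2).symm ▸ rfl⟩
  · rintro ⟨t, ht, rfl⟩
    have h1 : t < (0 :: preTail m L2 0 L1).length := by simp [length_preTail]; omega
    have h2 : t < (sufF m L2 L1).length := by rw [sufF_length]; omega
    exact ⟨t, h1, h2, (hcomp t h1 h2).symm⟩

lemma main_eq (n m : Int) (L1 L2 : List Int) (hdom : Dom_f n m L1 L2)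
    (hm : 1 ≤ m) (hn : n = (L1.length : Int)) : f n m L1 L2 = f_alt n m L1 L2 := by
  subst hn
  have hval := L2_val_bound _ m L1 L2 hdom
  -- B's F array and its characterization
  obtain ⟨hf1, hf2, hf3⟩ := FInv_fold (L1.length : Int) m hm L2 L1 rfl L1.length (by omega)
  set Fst := (PySem.List.pyRange 0 (L1.length : Int) 1).foldl (fAltFStep m L1 L2)
      ((List.replicate (m + 1).toNat ((L1.length : Int) + 1)).set 0 0, 0) with hFst
  have hF : ∀ j : Int, 0 ≤ j → j ≤ m → 0 ≤ PySem.List.pyGetD Fst.1 j 0 ∧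
      ∀ t : Nat, t ≤ L1.length →
        (PySem.List.pyGetD Fst.1 j 0 ≤ (t : Int) ↔ j ≤ preAt m L2 L1 t) := by
    intro j hj0 hjm
    by_cases hj : j ≤ Fst.2
    · obtain ⟨ha, hb⟩ := (hf3 j hj0 hjm).1 hj
      exact ⟨ha, fun t _ => hb t⟩
    · have he := (hf3 j hj0 hjm).2 (by omega)
      refine ⟨by rw [he]; positivity, ?_⟩
      intro t ht
      constructor
      · intro hle
        exfalso
        rw [he] at hle
        have hc : ((t : Nat) : Int) ≤ (L1.length : Int) := by exact_mod_cast ht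
        omega
      · intro hj'
        exfalso
        have := preAt_mono m L2 L1 ht
        rw [← hf1] at this
        omega
  have hmono : ∀ j j' : Int, 0 ≤ j → j ≤ j' → j' < m →
      PySem.List.pyGetD Fst.1 j 0 > (L1.length : Int) → PySem.List.pyGetD Fst.1 j' 0 > (L1.length : Int) := by
    intro j j' hj0 hjj hj'm hgt
    by_contra hle
    have h1 : j' ≤ preAt m L2 L1 L1.length :=
      ((hF j' (by omega) (by omega)).2 L1.length (le_refl _)).1 (by omega)
    have h2 : PySem.List.pyGetD Fst.1 j 0 ≤ ((L1.length : Nat) : Int) :=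
      ((hF j hj0 (by omega)).2 L1.length (le_refl _)).2 (by omega)
    omega
  -- B's suffix array is the reference one
  have hsuf : (PySem.List.pyRange ((L1.length : Int) - 1) (-1) (-1)).foldl (fAltSufStep m L1 L2) [0]
      = sufF m L2 L1 := bsuf_eq m L2 L1
  have hsufget : ∀ t : Int, 0 ≤ t → t ≤ (L1.length : Int) →
      PySem.List.pyGetD (sufF m L2 L1) t 0 = sufAt m L2 L1 t.toNat :=
    fun t h0 hle => sufF_pyGetD m L2 L1 t h0 hle
  have hs00 : PySem.List.pyGetD (sufF m L2 L1) 0 0 = sufAt m L2 L1 0 := hsufget 0 (le_refl 0) (by omega)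
  -- unfold B once
  have hfalt : f_alt (L1.length : Int) m L1 L2 =
      (if PySem.List.pyGetD (sufF m L2 L1) 0 0 ≥ m then 0
       else if PySem.List.pyGetD Fst.1 m 0 ≤ (L1.length : Int) then 0
       else match (PySem.List.pyRange 0 m 1).foldlM
          (fAltCombStep (L1.length : Int) m L2 (sufF m L2 L1) Fst.1) none with
        | Except.error r => r
        | Except.ok (some b) => b
        | Except.ok none => -1) := by
    rw [hFst, ← hsuf]
    unfold f_alt
    rfl
  rw [hfalt, fA_char m hm L1 L2 hval]
  have hzipany : (((0 :: preTail m L2 0 L1).zip (sufF m L2 L1)).any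
      (fun q => decide (m ≤ q.1 + q.2)) = true)
      ↔ ∃ t : Nat, t ≤ L1.length ∧ m ≤ preAt m L2 L1 t + sufAt m L2 L1 t := by
    rw [List.any_eq_true]
    constructor
    · rintro ⟨q, hq, hc⟩
      obtain ⟨t, ht, rfl⟩ := (zip_pairs_mem m L2 L1 q).1 hq
      rw [decide_eq_true_eq] at hc
      exact ⟨t, ht, hc⟩
    · rintro ⟨t, ht, hc⟩
      exact ⟨(preAt m L2 L1 t, sufAt m L2 L1 t),
        (zip_pairs_mem m L2 L1 _).2 ⟨t, ht, rfl⟩, by rw [decide_eq_true_eq]; exact hc⟩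
  -- the three zero-exits of B, as statements about preAt/sufAt
  have hcomb := comb_char (L1.length : Int) m L2 (sufF m L2 L1) Fst.1 hmono m.toNat 0 none
    (le_refl 0) (by omega)
  have hmatch : ∀ e : Except Int (Option Int),
      (match e with
        | Except.error r => r
        | Except.ok (some b) => b
        | Except.ok none => -1) = finalInt e := by
    rintro (r | (_ | b)) <;> rfl
  by_cases hzero : ∃ t : Nat, t ≤ L1.length ∧ m ≤ preAt m L2 L1 t + sufAt m L2 L1 t
  · rw [if_pos (hzipany.2 hzero)]
    by_cases h1 : PySem.List.pyGetD (sufF m L2 L1) 0 0 ≥ m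
    · rw [if_pos h1]
    · rw [if_neg h1]
      by_cases h2 : PySem.List.pyGetD Fst.1 m 0 ≤ (L1.length : Int)
      · rw [if_pos h2]
      · rw [if_neg h2]
        obtain ⟨t, ht, hsum⟩ := hzero
        have hj0 := preAt_nonneg m L2 L1 t
        have hjm := preAt_le_m m (by omega) L2 L1 t
        have hjlt : preAt m L2 L1 t < m := by
          rcases lt_or_eq_of_le hjm with h | h
          · exact h
          · exfalso
            have : PySem.List.pyGetD Fst.1 m 0 ≤ (t : Int) :=
              ((hF m (by omega) (le_refl _)).2 t ht).2 (by omega)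
            have hc : ((t : Nat) : Int) ≤ (L1.length : Int) := by exact_mod_cast ht
            omega
        have hFle : PySem.List.pyGetD Fst.1 (preAt m L2 L1 t) 0 ≤ (t : Int) :=
          ((hF _ hj0 hjm).2 t ht).2 (le_refl _)
        have hFpos := (hF _ hj0 hjm).1
        have htlen : ((t : Nat) : Int) ≤ (L1.length : Int) := by exact_mod_cast ht
        have hsg : PySem.List.pyGetD (sufF m L2 L1) (PySem.List.pyGetD Fst.1 (preAt m L2 L1 t) 0) 0
            = sufAt m L2 L1 (PySem.List.pyGetD Fst.1 (preAt m L2 L1 t) 0).toNat :=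
          hsufget _ hFpos (by omega)
        have hanti : sufAt m L2 L1 t ≤ sufAt m L2 L1 (PySem.List.pyGetD Fst.1 (preAt m L2 L1 t) 0).toNat :=
          sufAt_anti m L2 L1 (by omega)
        rw [hmatch, hcomb, if_pos (by
          rw [List.any_eq_true]
          refine ⟨preAt m L2 L1 t, ?_, ?_⟩
          · rw [PySem.List.mem_pyRange_one]
            omega
          · rw [decide_eq_true_eq]
            refine ⟨by omega, ?_⟩
            rw [hsg]
            omega)]
  · rw [if_neg (fun h => hzero (hzipany.1 h))]
    have hnz : ∀ t : Nat, t ≤ L1.length → preAt m L2 L1 t + sufAt m L2 L1 t ≤ m - 1 := by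
      intro t ht
      by_contra hcc
      exact hzero ⟨t, ht, by omega⟩
    rw [if_neg (show ¬(PySem.List.pyGetD (sufF m L2 L1) 0 0 ≥ m) from by
      rw [hs00]
      have := hnz 0 (by omega)
      have := preAt_nonneg m L2 L1 0
      have h00 : preAt m L2 L1 0 = 0 := by
        unfold preAt
        simp
      omega)]
    rw [if_neg (show ¬(PySem.List.pyGetD Fst.1 m 0 ≤ (L1.length : Int)) from by
      intro hle
      have hFpos := (hF m (by omega) (le_refl _)).1
      have htN : (PySem.List.pyGetD Fst.1 m 0).toNat ≤ L1.length := by omega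
      have hjp : m ≤ preAt m L2 L1 (PySem.List.pyGetD Fst.1 m 0).toNat :=
        ((hF m (by omega) (le_refl _)).2 _ htN).1 (by omega)
      have := hnz _ htN
      have := sufAt_nonneg m L2 L1 (PySem.List.pyGetD Fst.1 m 0).toNat
      omega)]
    rw [hmatch, hcomb, if_neg (show ¬(_ = true) from by
      rw [List.any_eq_true]
      rintro ⟨j, hjr, hjc⟩
      rw [PySem.List.mem_pyRange_one] at hjr
      rw [decide_eq_true_eq] at hjc
      obtain ⟨hj0, hjlt⟩ := hjr
      obtain ⟨hle, hsumz⟩ := hjc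
      have hFpos := (hF j hj0 (by omega)).1
      have htN : (PySem.List.pyGetD Fst.1 j 0).toNat ≤ L1.length := by omega
      have hjp : j ≤ preAt m L2 L1 (PySem.List.pyGetD Fst.1 j 0).toNat :=
        ((hF j hj0 (by omega)).2 _ htN).1 (by omega)
      rw [hsufget _ hFpos (by omega)] at hsumz
      have := hnz _ htN
      omega)]
    -- both sides are now a minimum over the same candidate values
    apply values_eq
    · intro x hx
      obtain ⟨q, hq, rfl⟩ := List.mem_map.1 hx
      have := hval q.1
      rw [shift60]
      omega
    · intro x
      constructor
      · intro hx
        obtain ⟨q, hq, rfl⟩ := List.mem_map.1 hx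
        obtain ⟨hqzip, hqc⟩ := List.mem_filter.1 hq
        obtain ⟨t, ht, rfl⟩ := (zip_pairs_mem m L2 L1 q).1 hqzip
        rw [beq_iff_eq] at hqc
        simp only at hqc
        have hj0 := preAt_nonneg m L2 L1 t
        have hsn := sufAt_nonneg m L2 L1 t
        have hjm : preAt m L2 L1 t < m := by omega
        have hFle : PySem.List.pyGetD Fst.1 (preAt m L2 L1 t) 0 ≤ (t : Int) :=
          ((hF _ hj0 (by omega)).2 t ht).2 (le_refl _)
        have hFpos := (hF _ hj0 (by omega)).1
        have htlen : ((t : Nat) : Int) ≤ (L1.length : Int) := by exact_mod_cast ht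
        have htN : (PySem.List.pyGetD Fst.1 (preAt m L2 L1 t) 0).toNat ≤ L1.length := by omega
        have hanti : sufAt m L2 L1 t ≤ sufAt m L2 L1 (PySem.List.pyGetD Fst.1 (preAt m L2 L1 t) 0).toNat :=
          sufAt_anti m L2 L1 (by omega)
        have hjp : preAt m L2 L1 t ≤ preAt m L2 L1 (PySem.List.pyGetD Fst.1 (preAt m L2 L1 t) 0).toNat :=
          ((hF _ hj0 (by omega)).2 _ htN).1 (by omega)
        have hub := hnz _ htN
        refine List.mem_map.2 ⟨preAt m L2 L1 t, List.mem_filter.2 ⟨?_, ?_⟩, rfl⟩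
        · rw [PySem.List.mem_pyRange_one]
          omega
        · rw [decide_eq_true_eq]
          refine ⟨by omega, ?_⟩
          rw [hsufget _ hFpos (by omega)]
          omega
      · intro hx
        obtain ⟨j, hj, rfl⟩ := List.mem_map.1 hx
        obtain ⟨hjr, hjc⟩ := List.mem_filter.1 hj
        rw [PySem.List.mem_pyRange_one] at hjr
        rw [decide_eq_true_eq] at hjc
        obtain ⟨hj0, hjlt⟩ := hjr
        obtain ⟨hle, hsum⟩ := hjc
        have hFpos := (hF j hj0 (by omega)).1
        rw [hsufget _ hFpos (by omega)] at hsum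
        have htN : (PySem.List.pyGetD Fst.1 j 0).toNat ≤ L1.length := by omega
        have hjp : j ≤ preAt m L2 L1 (PySem.List.pyGetD Fst.1 j 0).toNat :=
          ((hF j hj0 (by omega)).2 _ htN).1 (by omega)
        have hub := hnz _ htN
        have hsn := sufAt_nonneg m L2 L1 (PySem.List.pyGetD Fst.1 j 0).toNat
        have hpe : preAt m L2 L1 (PySem.List.pyGetD Fst.1 j 0).toNat = j := by omega
        refine List.mem_map.2 ⟨(preAt m L2 L1 (PySem.List.pyGetD Fst.1 j 0).toNat,
          sufAt m L2 L1 (PySem.List.pyGetD Fst.1 j 0).toNat),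
          List.mem_filter.2 ⟨(zip_pairs_mem m L2 L1 _).2 ⟨_, htN, rfl⟩, ?_⟩, by rw [hpe]⟩
        rw [beq_iff_eq]
        simp only
        omega

-- ===== degenerate regions =====

lemma pyGetD_nonneg (xs : List Int) (i : Int) (h : ∀ x ∈ xs, 0 ≤ x) : 0 ≤ PySem.List.pyGetD xs i 0 := by
  by_cases hin : PySem.Raise.InRange xs.length i
  · exact h _ (PySem.List.pyGetD_mem xs 0 hin)
  · rw [PySem.List.pyGetD_of_none]
    rw [PySem.List.pyGet?_eq_none_iff]
    exact hin

-- With m ≤ 0 B's first exit fires: the suffix cells are nonnegative, hence ≥ m.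
lemma falt_nonpos (n m : Int) (hm : m ≤ 0) (L1 L2 : List Int) : f_alt n m L1 L2 = 0 := by
  have hnn : ∀ x ∈ (PySem.List.pyRange (n - 1) (-1) (-1)).foldl (fAltSufStep m L1 L2) [0], 0 ≤ x :=
    bsuf_nonneg m L1 L2 _ [0] (by simp)
  have h0 : 0 ≤ PySem.List.pyGetD ((PySem.List.pyRange (n - 1) (-1) (-1)).foldl (fAltSufStep m L1 L2) [0]) 0 0 :=
    pyGetD_nonneg _ _ hnn
  unfold f_alt
  rw [if_pos (by omega)]

-- On the m = 1 early-match region both sides return 0 at once.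
lemma fA_w4 (n : Int) (L1 L2 : List Int) (hn1 : 1 ≤ n)
    (hcmp : PySem.List.pyGetD L1 (n - 1) 0 ≥ PySem.List.pyGetD L2 0 0) : f n 1 L1 L2 = 0 := by
  unfold f
  rw [PySem.List.pyRange_neg_one_cons (by omega : (-1 : Int) < n - 1), List.foldlM_cons]
  rw [show fStep1 1 L1 L2 [0] (n - 1) = Except.error 0 from by
    simp only [fStep1, List.headD_cons]
    rw [show ((1 : Int) - 1 - 0) = 0 from by norm_num]
    rw [if_pos hcmp, if_pos (by norm_num)]]
  rfl

lemma bsuf_one_frozen (L1 L2 : List Int) (rng : List Int) :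
    ∀ acc : List Int, ∃ t, rng.foldl (fAltSufStep 1 L1 L2) (1 :: acc) = 1 :: t := by
  induction rng with
  | nil => exact fun acc => ⟨acc, rfl⟩
  | cons i rest ih =>
    intro acc
    rw [List.foldl_cons]
    rw [show fAltSufStep 1 L1 L2 (1 :: acc) i = 1 :: 1 :: acc from by
      simp only [fAltSufStep, List.headD_cons]
      rw [if_neg (by intro h; exact absurd h.1 (by omega))]]
    exact ih (1 :: acc)

lemma fB_w4 (n : Int) (L1 L2 : List Int) (hn1 : 1 ≤ n)
    (hcmp : PySem.List.pyGetD L1 (n - 1) 0 ≥ PySem.List.pyGetD L2 0 0) : f_alt n 1 L1 L2 = 0 := by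
  obtain ⟨t, ht⟩ := bsuf_one_frozen L1 L2 (PySem.List.pyRange (n - 1 - 1) (-1) (-1)) [0]
  have hfold : (PySem.List.pyRange (n - 1) (-1) (-1)).foldl (fAltSufStep 1 L1 L2) [0] = 1 :: t := by
    rw [PySem.List.pyRange_neg_one_cons (by omega : (-1 : Int) < n - 1), List.foldl_cons]
    rw [show fAltSufStep 1 L1 L2 [0] (n - 1) = 1 :: [0] from by
      simp only [fAltSufStep, List.headD_cons]
      rw [show ((1 : Int) - 1 - 0) = 0 from by norm_num]
      rw [if_pos ⟨by omega, hcmp⟩]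
      norm_num]
    exact ht
  have hg : PySem.List.pyGetD ((PySem.List.pyRange (n - 1) (-1) (-1)).foldl (fAltSufStep 1 L1 L2) [0]) 0 0 = 1 := by
    rw [hfold, PySem.List.pyGetD_zero_cons]
  unfold f_alt
  rw [if_pos (show PySem.List.pyGetD ((PySem.List.pyRange (n - 1) (-1) (-1)).foldl
    (fAltSufStep 1 L1 L2) [0]) 0 0 ≥ 1 from by rw [hg])]

-- With m ≤ 0 A's loop 1 can neither hit suf[i] == m nor stop: it returns an all-nonnegative array.
lemma loop1_ok_nonneg (m : Int) (hm : m ≤ 0) (L1 L2 : List Int) (rng : List Int) :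
    ∀ acc : List Int, (∀ x ∈ acc, 0 ≤ x) →
    ∃ acc', rng.foldlM (fStep1 m L1 L2) acc = Except.ok acc' ∧ (∀ x ∈ acc', 0 ≤ x) := by
  induction rng with
  | nil =>
    intro acc hacc
    exact ⟨acc, rfl, hacc⟩
  | cons i rest ih =>
    intro acc hacc
    have hs : 0 ≤ acc.headD 0 := by
      cases acc with
      | nil => simp
      | cons a t => exact hacc a List.mem_cons_self
    rw [List.foldlM_cons]
    rw [show fStep1 m L1 L2 acc i
        = if PySem.List.pyGetD L1 i 0 ≥ PySem.List.pyGetD L2 (m - 1 - acc.headD 0) 0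
          then Except.ok ((acc.headD 0 + 1) :: acc) else Except.ok (acc.headD 0 :: acc) by
      simp only [fStep1]
      rw [if_neg (show ¬(acc.headD 0 + 1 = m) from by omega)]]
    by_cases hc : PySem.List.pyGetD L1 i 0 ≥ PySem.List.pyGetD L2 (m - 1 - acc.headD 0) 0
    · rw [if_pos hc]
      obtain ⟨acc', h1, h2⟩ := ih ((acc.headD 0 + 1) :: acc) (by
        intro x hx
        rcases List.mem_cons.1 hx with rfl | hx'
        · omega
        · exact hacc x hx')
      exact ⟨acc', h1, h2⟩
    · rw [if_neg hc]
      obtain ⟨acc', h1, h2⟩ := ih ((acc.headD 0) :: acc) (by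
        intro x hx
        rcases List.mem_cons.1 hx with rfl | hx'
        · exact hs
        · exact hacc x hx')
      exact ⟨acc', h1, h2⟩

-- A on the empty L1 (n = 0), written out.
lemma fA_empty (m : Int) (L2 : List Int) :
    f 0 m [] L2 = if (0 : Int) = m - 1
      then (if PySem.List.pyGetD L2 0 0 = (1 : Int) <<< 60 then -1 else PySem.List.pyGetD L2 0 0)
      else -1 := by
  unfold f
  rw [show (0 : Int) - 1 = -1 by norm_num, PySem.List.pyRange_neg_one_eq_nil (by omega)]
  show (if (if PySem.List.pyGetD [(0 : Int)] 0 0 = m - 1 then PySem.List.pyGetD L2 0 0 else (1 : Int) <<< 60) = (1 : Int) <<< 60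
        then (-1 : Int)
        else (if PySem.List.pyGetD [(0 : Int)] 0 0 = m - 1 then PySem.List.pyGetD L2 0 0 else (1 : Int) <<< 60)) = _
  rw [PySem.List.pyGetD_zero_cons]
  by_cases h : (0 : Int) = m - 1
  · rw [if_pos h, if_pos h]
  · rw [if_neg h, if_neg h, if_pos rfl]

theorem f_spec : Claim_unchanged_f := by
  intro n m L1 L2 hdom hpre
  unfold Spec_f
  intro hnd
  rcases hpre with ⟨hn1, hnlen, hm0, hnm⟩ | ⟨hn, hm, hmlen⟩ | ⟨hn0, hlen1, hm3⟩ | ⟨hm1, hn1, hnlen, hl2, hcmp⟩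
  · -- m ≤ 0, 1 ≤ n ≤ len(L1), n ≤ len(L2) + m: both sides return 0
    rw [falt_nonpos n m hm0 L1 L2]
    obtain ⟨acc', hfold, hnn⟩ :=
      loop1_ok_nonneg m hm0 L1 L2 (PySem.List.pyRange (n - 1) (-1) (-1)) [0] (by simp)
    cases L1 with
    | nil => simp only [List.length_nil, Nat.cast_zero] at hnlen; omega
    | cons v t =>
      unfold f
      rw [hfold]
      show (match ((0, v) :: PySem.List.enumerate t ((0 : Int) + 1)).foldlM (fStep2 m L2 acc')
            (0, if PySem.List.pyGetD acc' 0 0 = m - 1 then PySem.List.pyGetD L2 0 0 else (1 : Int) <<< 60) with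
          | Except.error r => r
          | Except.ok st => if st.2 = (1 : Int) <<< 60 then -1 else st.2) = 0
      rw [List.foldlM_cons]
      rw [show fStep2 m L2 acc'
            (0, if PySem.List.pyGetD acc' 0 0 = m - 1 then PySem.List.pyGetD L2 0 0 else (1 : Int) <<< 60)
            ((0 : Int), v) = Except.error 0 by
        rw [fStep2]
        simp only
        rw [if_pos]
        have h1 : (0 : Int) ≤ if v ≥ PySem.List.pyGetD L2 0 0 then (0 : Int) + 1 else 0 := by
          split <;> omega
        have h2 : (0 : Int) ≤ PySem.List.pyGetD acc' ((0 : Int) + 1) 0 := pyGetD_nonneg acc' _ hnn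
        omega]
      rfl
  · exact main_eq n m L1 L2 hdom hm hn
  · have hL1 : L1 = [] := List.eq_nil_of_length_eq_zero hlen1
    subst hL1
    have hm1 : 1 ≤ m := by
      by_contra h
      exact hnd ⟨hn0, by omega⟩
    exact main_eq n m [] L2 hdom hm1 (by simpa using hn0)
  · subst hm1
    rw [fA_w4 n L1 L2 hn1 hcmp, fB_w4 n L1 L2 hn1 hcmp]

-- ===== VERDICT (by name: the statement is the Claim_ definition above) =====
theorem f_changed : Claim_changed_f := by unfold Claim_changed_f; decide

theorem f_tight : Claim_exact_f := by
  intro n m L1 L2 _ hpre hd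
  obtain ⟨hn0, hm0⟩ := hd
  subst hn0
  rcases hpre with ⟨hn1, _, _, _⟩ | ⟨_, hm1, _⟩ | ⟨_, hlen1, _⟩ | ⟨_, hn1, _, _, _⟩
  · omega
  · omega
  · have hL1 : L1 = [] := List.eq_nil_of_length_eq_zero hlen1
    subst hL1
    rw [fA_empty, falt_nonpos 0 m hm0 [] L2, if_neg (by omega : ¬((0 : Int) = m - 1))]
    decide
  · omega
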